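-- pv_equiv track=rewrite | github.com/SpartanOnix/ProyectosFacultad | Complejidad/Practica01/lector.py | numVaribles
-- ===== SOURCE A (Python) =====
-- def numVaribles(expr):
--     lin = ""
--     vari = 0
--     for n in expr:
--         lin = n.split("u")
--         for i in lin:
--             vari += 1
--     return vari
-- ===== SOURCE B (Python) =====
-- def numVaribles(expr):
--     # Segments across all strings = (one segment per string) + (one extra per delimiter).
--     # Single character-level scan over the joined text; no split lists, no per-string pass.
--     vari = len(expr)
--     for ch in "".join(expr):
--         if ch == "u":
--             vari += 1
--     return vari
-- ===== Notes on version B (the rewrite author's own statement) =====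
-- stated objective: simpler
-- what changed: B does a single character-level scan over the concatenation of all strings, starting the accumulator at len(expr) and adding 1 per 'u' character, instead of A's nested per-string split-and-count-pieces loops; no split list is ever built.
import Mathlib
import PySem

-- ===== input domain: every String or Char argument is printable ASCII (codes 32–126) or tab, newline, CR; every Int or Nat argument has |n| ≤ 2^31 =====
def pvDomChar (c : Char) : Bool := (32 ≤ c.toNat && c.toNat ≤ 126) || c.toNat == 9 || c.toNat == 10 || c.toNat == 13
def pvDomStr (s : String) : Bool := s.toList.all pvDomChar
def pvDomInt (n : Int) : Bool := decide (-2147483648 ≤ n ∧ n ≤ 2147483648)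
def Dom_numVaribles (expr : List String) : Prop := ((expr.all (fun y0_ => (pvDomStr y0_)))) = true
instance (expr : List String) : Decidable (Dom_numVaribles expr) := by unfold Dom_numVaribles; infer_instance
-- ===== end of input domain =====

-- B replaces A's nested split-and-count-pieces loops with one flat character scan over the
-- joined text, seeded with len(expr) (objective: simpler).

-- ===== PORT A =====
-- for each n: lin = n.split("u"); for i in lin: vari += 1
def numVaribles (expr : List String) : Int :=
  expr.foldl (fun vari n =>
    let lin := (PySem.Chars.splitOn n.toList "u".toList).map String.ofList
    lin.foldl (fun vari _i => vari + 1) vari) 0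

-- ===== PORT B =====
-- vari = len(expr); for ch in "".join(expr): if ch == "u": vari += 1
def numVaribles_alt (expr : List String) : Int :=
  let joined := PySem.Str.join "" expr
  joined.toList.foldl (fun vari ch => if ch = 'u' then vari + 1 else vari)
    (expr.length : Int)

-- ===== PRECONDITION & SPEC =====
def Spec_numVaribles (expr : List String) (out : Int) : Prop := out = numVaribles_alt expr
instance (expr : List String) (out : Int) : Decidable (Spec_numVaribles expr out) := by unfold Spec_numVaribles; infer_instance

-- ===== CLAIM (what is proved, stated in full; the proofs are below) =====
def Claim_equal_numVaribles : Prop := ∀ (expr : List String), Dom_numVaribles expr → Spec_numVaribles expr (numVaribles expr)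

-- ===== LEMMAS AND PROOFS =====

-- A's inner per-segment loop only measures the length of the split list
theorem pv_foldl_add_one {α : Type} (l : List α) (v : Int) :
    l.foldl (fun vari (_ : α) => vari + 1) v = v + l.length := by
  induction l generalizing v with
  | nil => simp
  | cons a t ih => simp [List.foldl, ih]; omega

-- with a single-character separator, split produces (count of that char) + 1 pieces
theorem pv_splitOn_go_length (c : Char) (fuel : Nat) (l cur : List Char)
    (acc : List (List Char)) (h : l.length ≤ fuel) :
    (PySem.Chars.splitOn.go [c] fuel l cur acc).length = acc.length + l.count c + 1 := by
  induction fuel generalizing l cur acc with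
  | zero =>
    have : l = [] := List.eq_nil_of_length_eq_zero (Nat.le_zero.mp h)
    subst this
    simp [PySem.Chars.splitOn.go]
  | succ f ih =>
    cases l with
    | nil => simp [PySem.Chars.splitOn.go]
    | cons a t =>
      simp only [PySem.Chars.splitOn.go]
      by_cases hc : a = c
      · subst hc
        have hp : List.isPrefixOf [a] (a :: t) = true := by simp [List.isPrefixOf]
        rw [if_pos hp]
        have ht : t.length ≤ f := by simpa using h
        simp only [List.length_cons, List.length_nil, Nat.zero_add, List.drop_succ_cons, List.drop_zero] at *
        rw [ih t [] _ ht]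
        simp
        omega
      · have hp : List.isPrefixOf [c] (a :: t) = false := by
          simp [List.isPrefixOf]; exact fun h' => absurd h'.symm hc
        rw [if_neg (by simp [hp])]
        have ht : t.length ≤ f := by simpa using h
        rw [ih t (a :: cur) acc ht]
        simp [hc]

theorem pv_split_length (s : String) :
    ((PySem.Chars.splitOn s.toList "u".toList).map String.ofList).length
      = s.toList.count 'u' + 1 := by
  have : "u".toList = ['u'] := rfl
  rw [List.length_map, this, PySem.Chars.splitOn]
  rw [pv_splitOn_go_length 'u' (s.toList.length + 1) s.toList [] [] (Nat.le_succ _)]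
  simp

-- B's character scan counts the 'u' characters
theorem pv_foldl_count_u (l : List Char) (v : Int) :
    l.foldl (fun vari ch => if ch = 'u' then vari + 1 else vari) v = v + l.count 'u' := by
  induction l generalizing v with
  | nil => simp
  | cons a t ih =>
    simp only [List.foldl_cons, ih]
    by_cases h : a = 'u'
    · simp [h]; ring
    · simp [h]

-- pull a constant starting value out of A's outer fold
theorem pv_foldl_shift (l : List String) (v : Int) :
    l.foldl (fun vari n =>
      let lin := (PySem.Chars.splitOn n.toList "u".toList).map String.ofList
      lin.foldl (fun vari _i => vari + 1) vari) v
    = v + l.foldl (fun vari n =>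
      let lin := (PySem.Chars.splitOn n.toList "u".toList).map String.ofList
      lin.foldl (fun vari _i => vari + 1) vari) 0 := by
  induction l generalizing v with
  | nil => simp
  | cons s t ih =>
    simp only [List.foldl_cons]
    rw [pv_foldl_add_one, pv_foldl_add_one, ih, ih (0 + _)]
    ring

-- "".join(expr) is the concatenation of the strings' characters
theorem pv_join_empty_sep (parts : List (List Char)) :
    PySem.Chars.join [] parts = parts.flatten := by
  induction parts with
  | nil => simp [PySem.Chars.join_nil]
  | cons p rest ih =>
    cases rest with
    | nil => simp [PySem.Chars.join_singleton]
    | cons q t => rw [PySem.Chars.join_cons_cons]; simp [ih]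

theorem pv_join_toList (expr : List String) :
    (PySem.Str.join "" expr).toList = (expr.map String.toList).flatten := by
  simp [PySem.Str.toList_join, pv_join_empty_sep]

-- A's nested loops compute len(expr) + number of 'u' characters overall
theorem pv_A_closed (expr : List String) :
    numVaribles expr
      = (expr.length : Int) + ((expr.map String.toList).flatten.count 'u' : Int) := by
  unfold numVaribles
  induction expr with
  | nil => rfl
  | cons s t ih =>
    simp only [List.foldl_cons, List.map_cons, List.flatten_cons]
    rw [pv_foldl_add_one, pv_split_length, pv_foldl_shift, ih]
    simp [List.count_append]
    ring

-- ===== VERDICT (by name: the statement is the Claim_ definition above) =====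
theorem numVaribles_spec : Claim_equal_numVaribles := by
  intro expr _
  unfold Spec_numVaribles numVaribles_alt
  simp only []
  rw [pv_join_toList, pv_foldl_count_u, pv_A_closed]
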